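-- pv_equiv track=rewrite | github.com/hunterkalinoski/AdventOfCode | 2023/day_1/main.py | find_earliest_occurrence
-- ===== SOURCE A (Python) =====
-- def find_earliest_occurrence(line: str, items: list) -> str:
--     earliest_index = float('inf')
--     earliest_val = ""
--     for item in items:
--         i = line.find(item)
--         if i != -1 and i < earliest_index:
--             earliest_index = i
--             earliest_val = item
--     return earliest_val
-- ===== SOURCE B (Python) =====
-- def find_earliest_occurrence(line: str, items: list) -> str:
--     for i in range(len(line) + 1):
--         for item in items:
--             if line.startswith(item, i):
--                 return item
--     return ""
-- ===== Notes on version B (the rewrite author's own statement) =====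
-- stated objective: alternative
-- what changed: B replaces A's per-item scan that minimizes line.find(item) over all items by a single left-to-right scan over positions, returning the first item (in list order) that matches at the earliest position via line.startswith(item, i).
import Mathlib
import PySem

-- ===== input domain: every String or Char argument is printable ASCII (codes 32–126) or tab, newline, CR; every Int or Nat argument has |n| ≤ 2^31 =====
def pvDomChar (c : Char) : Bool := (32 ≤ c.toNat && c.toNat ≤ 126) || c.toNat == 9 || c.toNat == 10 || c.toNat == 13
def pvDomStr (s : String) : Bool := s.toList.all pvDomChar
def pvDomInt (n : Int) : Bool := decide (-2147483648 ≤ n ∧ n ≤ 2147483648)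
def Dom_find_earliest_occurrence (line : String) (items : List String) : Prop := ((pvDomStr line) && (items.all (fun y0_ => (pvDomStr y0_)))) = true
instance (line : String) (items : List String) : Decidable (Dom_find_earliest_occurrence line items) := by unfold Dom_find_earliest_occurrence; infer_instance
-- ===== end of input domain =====

-- B replaces A's per-item minimum-of-find scan by a single left-to-right position scan
-- that returns the first item (in list order) matching at the earliest position (objective: alternative).

-- ===== PORT A =====
-- float('inf') is modelled by `none`; pvCmpInf i e? is Python's `i < earliest_index`.
def pvCmpInf (i : Int) : Option Int → Bool
  | none => true
  | some e => decide (i < e)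

def find_earliest_occurrence (line : String) (items : List String) : String :=
  (items.foldl (fun st item =>
      let i := PySem.Str.find line item
      if i != -1 && pvCmpInf i st.1 then (some i, item) else st)
    ((none : Option Int), "")).2

-- ===== PORT B =====
-- outer loop over positions i = 0 .. len(line) as structural recursion on the suffix;
-- the inner `for item in items: if line.startswith(item, i)` is items.find?.
def pvAltGo (items : List String) : List Char → String
  | [] =>
    match items.find? (fun it => PySem.Chars.startswith [] it.toList) with
    | some it => it
    | none => ""
  | c :: t =>
    match items.find? (fun it => PySem.Chars.startswith (c :: t) it.toList) with
    | some it => it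
    | none => pvAltGo items t

def find_earliest_occurrence_alt (line : String) (items : List String) : String :=
  pvAltGo items line.toList

-- ===== PRECONDITION & SPEC =====
def Spec_find_earliest_occurrence (line : String) (items : List String) (out : String) : Prop := out = find_earliest_occurrence_alt line items
instance (line : String) (items : List String) (out : String) : Decidable (Spec_find_earliest_occurrence line items out) := by unfold Spec_find_earliest_occurrence; infer_instance

-- ===== CLAIM (what is proved, stated in full; the proofs are below) =====
def Claim_equal_find_earliest_occurrence : Prop := ∀ (line : String) (items : List String), Dom_find_earliest_occurrence line items → Spec_find_earliest_occurrence line items (find_earliest_occurrence line items)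

-- ===== LEMMAS AND PROOFS =====

-- A's loop body, stated over List Char (Str.find s sub = Chars.find s.toList sub.toList).
def pvStepL (cs : List Char) (st : Option Int × String) (item : String) : Option Int × String :=
  let i := PySem.Chars.find cs item.toList
  if i != -1 && pvCmpInf i st.1 then (some i, item) else st

theorem pvA_eq_foldL (line : String) (items : List String) :
    find_earliest_occurrence line items = (items.foldl (pvStepL line.toList) ((none : Option Int), "")).2 := by
  simp only [find_earliest_occurrence, PySem.Str.find_eq]
  rfl

-- find s sub = 0 exactly when sub is a prefix of s
theorem pv_find_eq_zero_iff (s sub : List Char) :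
    PySem.Chars.find s sub = 0 ↔ sub <+: s := by
  constructor
  · intro h
    have h0 : (0 : Int) ≤ PySem.Chars.find s sub := by omega
    have := (PySem.Chars.find_spec h0).1
    simpa [h] using this
  · intro h
    have h0 : (0 : Int) ≤ PySem.Chars.find s sub := by
      rw [PySem.Chars.find_nonneg_iff]
      exact h.isInfix
    rcases (PySem.Chars.find_spec h0).2 with hmin
    by_contra hne
    have hpos : 0 < (PySem.Chars.find s sub).toNat := by omega
    exact hmin 0 hpos (by simpa using h)

-- shifting find by one when there is no match at position 0
theorem pv_find_cons (c : Char) (t sub : List Char) (h : ¬ sub <+: (c :: t)) :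
    PySem.Chars.find (c :: t) sub =
      if PySem.Chars.find t sub = -1 then -1 else PySem.Chars.find t sub + 1 := by
  by_cases hinf : sub <:+: t
  · have ht0 : (0 : Int) ≤ PySem.Chars.find t sub := (PySem.Chars.find_nonneg_iff t sub).2 hinf
    have htne : PySem.Chars.find t sub ≠ -1 := by omega
    rw [if_neg htne]
    have hspec := PySem.Chars.find_spec ht0
    have hinfc : sub <:+: (c :: t) := hinf.trans (List.infix_cons List.infix_rfl)
    have hc0 : (0 : Int) ≤ PySem.Chars.find (c :: t) sub := (PySem.Chars.find_nonneg_iff _ sub).2 hinfc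
    have hcspec := PySem.Chars.find_spec hc0
    -- uniqueness of the minimal index
    have hle : (PySem.Chars.find (c :: t) sub).toNat ≤ (PySem.Chars.find t sub).toNat + 1 := by
      by_contra hgt
      exact hcspec.2 ((PySem.Chars.find t sub).toNat + 1) (by omega) (by simpa using hspec.1)
    have hge : (PySem.Chars.find t sub).toNat + 1 ≤ (PySem.Chars.find (c :: t) sub).toNat := by
      by_contra hlt
      rw [not_le] at hlt
      rcases Nat.lt_or_ge (PySem.Chars.find (c :: t) sub).toNat 1 with h1 | h1
      · have : (PySem.Chars.find (c :: t) sub).toNat = 0 := by omega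
        exact h (by simpa [this] using hcspec.1)
      · have := hspec.2 ((PySem.Chars.find (c :: t) sub).toNat - 1) (by omega)
        apply this
        have : (c :: t).drop (PySem.Chars.find (c :: t) sub).toNat
            = t.drop ((PySem.Chars.find (c :: t) sub).toNat - 1) := by
          rcases Nat.exists_eq_add_of_le h1 with ⟨k, hk⟩
          simp [hk, Nat.add_comm]
        rw [← this]
        exact hcspec.1
    omega
  · have h1 : PySem.Chars.find t sub = -1 := (PySem.Chars.find_eq_neg_one_iff t sub).2 hinf
    rw [if_pos h1]
    rw [PySem.Chars.find_eq_neg_one_iff]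
    intro hc
    rcases (List.infix_cons_iff).1 hc with hpre | hin
    · exact h hpre
    · exact hinf hin

-- once A's state holds index 0 it never changes
theorem pv_fold_fixed_zero (cs : List Char) (items : List String) (v : String) :
    items.foldl (pvStepL cs) (some 0, v) = (some 0, v) := by
  induction items with
  | nil => rfl
  | cons it rest ih =>
    have hge : -1 ≤ PySem.Chars.find cs it.toList := PySem.Chars.neg_one_le_find cs it.toList
    simp only [List.foldl_cons, pvStepL]
    by_cases hne : PySem.Chars.find cs it.toList = -1
    · simp [hne, ih]
    · have : pvCmpInf (PySem.Chars.find cs it.toList) (some 0) = false := by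
        simp [pvCmpInf]; omega
      simp [this, ih]

-- invariant: A's stored index is never ≤ 0
def pvPos : Option Int → Prop
  | none => True
  | some e => 1 ≤ e

-- if some item is a prefix of cs, A's fold returns the first such item
theorem pv_fold_case1 (cs : List Char) (items : List String) (st : Option Int × String)
    (hst : pvPos st.1) (it0 : String)
    (h : items.find? (fun it => PySem.Chars.startswith cs it.toList) = some it0) :
    (items.foldl (pvStepL cs) st).2 = it0 := by
  induction items generalizing st with
  | nil => simp at h
  | cons it rest ih =>
    by_cases hm : PySem.Chars.startswith cs it.toList = true
    · have hit : it = it0 := by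
        simp only [List.find?_cons, hm, Option.some.injEq] at h
        exact h
      have hpre : it.toList <+: cs := (PySem.Chars.startswith_iff cs it.toList).1 hm
      have hf0 : PySem.Chars.find cs it.toList = 0 := (pv_find_eq_zero_iff cs it.toList).2 hpre
      have hcond : pvCmpInf (PySem.Chars.find cs it.toList) st.1 = true := by
        cases hse : st.1 with
        | none => simp [pvCmpInf]
        | some e =>
          have : (1 : Int) ≤ e := by simpa [pvPos, hse] using hst
          simp [pvCmpInf, hf0]; omega
      rw [hf0] at hcond
      simp only [List.foldl_cons, pvStepL, hf0, hcond, Bool.and_true]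
      norm_num
      rw [pv_fold_fixed_zero, hit]
    · have hmf : PySem.Chars.startswith cs it.toList = false := by simpa using hm
      simp only [List.find?_cons, hmf] at h
      have hnpre : ¬ it.toList <+: cs := fun hp =>
        hm ((PySem.Chars.startswith_iff cs it.toList).2 hp)
      have hf0 : PySem.Chars.find cs it.toList ≠ 0 := fun h0 =>
        hnpre ((pv_find_eq_zero_iff cs it.toList).1 h0)
      have hge : -1 ≤ PySem.Chars.find cs it.toList := PySem.Chars.neg_one_le_find cs it.toList
      simp only [List.foldl_cons, pvStepL]
      by_cases hcond : (PySem.Chars.find cs it.toList != -1 && pvCmpInf (PySem.Chars.find cs it.toList) st.1) = true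
      · rw [if_pos hcond]
        apply ih _ _ h
        simp only [Bool.and_eq_true, bne_iff_ne] at hcond
        simp only [pvPos]
        omega
      · rw [if_neg hcond]
        exact ih _ hst h

-- relation between A's folds on c :: t and on t when nothing matches at position 0
theorem pv_fold_shift (c : Char) (t : List Char) (items : List String)
    (hnone : ∀ it ∈ items, ¬ it.toList <+: (c :: t))
    (st st' : Option Int × String)
    (h2 : st.2 = st'.2) (h1 : st.1 = st'.1.map (· + 1)) :
    (items.foldl (pvStepL (c :: t)) st).2 = (items.foldl (pvStepL t) st').2 := by
  induction items generalizing st st' with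
  | nil => simpa using h2
  | cons it rest ih =>
    have hnp : ¬ it.toList <+: (c :: t) := hnone it (List.mem_cons_self ..)
    have hshift := pv_find_cons c t it.toList hnp
    simp only [List.foldl_cons, pvStepL]
    by_cases hne : PySem.Chars.find t it.toList = -1
    · rw [if_pos hne] at hshift
      have h1' : (PySem.Chars.find (c :: t) it.toList != -1) = false := by simp [hshift]
      have h2' : (PySem.Chars.find t it.toList != -1) = false := by simp [hne]
      simp only [h1', h2', Bool.false_and, Bool.false_eq_true, if_false]
      exact ih (fun x hx => hnone x (List.mem_cons_of_mem _ hx)) st st' h2 h1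
    · rw [if_neg hne] at hshift
      have hge : -1 ≤ PySem.Chars.find t it.toList := PySem.Chars.neg_one_le_find t it.toList
      have hcmp : pvCmpInf (PySem.Chars.find (c :: t) it.toList) st.1
          = pvCmpInf (PySem.Chars.find t it.toList) st'.1 := by
        cases hse : st'.1 with
        | none => simp [h1, hse, pvCmpInf]
        | some e =>
          simp only [h1, hse, Option.map_some, pvCmpInf, hshift]
          simp
      have hne' : (PySem.Chars.find (c :: t) it.toList != -1) = true := by
        simp [hshift]; omega
      have hne'' : (PySem.Chars.find t it.toList != -1) = true := by simpa using hne
      rw [hcmp, hne', hne'']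
      by_cases hcond : pvCmpInf (PySem.Chars.find t it.toList) st'.1 = true
      · simp only [hcond, Bool.and_self, if_pos]
        exact ih (fun x hx => hnone x (List.mem_cons_of_mem _ hx))
          (some (PySem.Chars.find (c :: t) it.toList), it)
          (some (PySem.Chars.find t it.toList), it) rfl (by simp [hshift])
      · simp only [Bool.not_eq_true] at hcond
        simp only [hcond, Bool.and_false, if_neg, Bool.false_eq_true, not_false_iff]
        exact ih (fun x hx => hnone x (List.mem_cons_of_mem _ hx)) st st' h2 h1

-- if no item occurs in cs at all, A's fold keeps its state
theorem pv_fold_no_match (cs : List Char) (items : List String) (st : Option Int × String)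
    (h : ∀ it ∈ items, PySem.Chars.find cs it.toList = -1) :
    items.foldl (pvStepL cs) st = st := by
  induction items generalizing st with
  | nil => rfl
  | cons it rest ih =>
    have h0 := h it (List.mem_cons_self ..)
    simp only [List.foldl_cons, pvStepL, h0]
    norm_num
    exact ih _ (fun x hx => h x (List.mem_cons_of_mem _ hx))

-- main equivalence over List Char
theorem pv_main (items : List String) (cs : List Char) :
    pvAltGo items cs = (items.foldl (pvStepL cs) ((none : Option Int), "")).2 := by
  induction cs with
  | nil =>
    cases hf : items.find? (fun it => PySem.Chars.startswith [] it.toList) with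
    | some it0 =>
      rw [pvAltGo, hf]
      exact (pv_fold_case1 [] items ((none : Option Int), "") trivial it0 hf).symm
    | none =>
      rw [pvAltGo, hf]
      rw [pv_fold_no_match]
      intro it hit
      have hns := List.find?_eq_none.1 hf it hit
      rw [PySem.Chars.find_eq_neg_one_iff]
      intro hinf
      have hnil : it.toList = [] := List.infix_nil.1 hinf
      exact hns (by simp [PySem.Chars.startswith_iff, hnil])
  | cons c t ih =>
    cases hf : items.find? (fun it => PySem.Chars.startswith (c :: t) it.toList) with
    | some it0 =>
      rw [pvAltGo, hf]
      exact (pv_fold_case1 (c :: t) items ((none : Option Int), "") trivial it0 hf).symm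
    | none =>
      rw [pvAltGo, hf, ih]
      have hnone : ∀ it ∈ items, ¬ it.toList <+: (c :: t) := by
        intro it hit hp
        have := List.find?_eq_none.1 hf it hit
        exact this ((PySem.Chars.startswith_iff _ _).2 hp)
      exact (pv_fold_shift c t items hnone _ _ rfl rfl).symm

-- ===== VERDICT (by name: the statement is the Claim_ definition above) =====
theorem find_earliest_occurrence_spec : Claim_equal_find_earliest_occurrence := by
  intro line items _
  unfold Spec_find_earliest_occurrence
  rw [pvA_eq_foldL, find_earliest_occurrence_alt, pv_main]
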